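-- pv_equiv track=rewrite | github.com/zkangHUST/LeetCodeSolution | Python/475.py | check
-- ===== SOURCE A (Python) =====
-- def check(houses, heaters, r):
--     if r < 0:
--         return False
--     flag = False
--     for val in houses:
--         for h in heaters:
--             if h - r <= val <= h + r:
--                 flag = True
--                 break
--         if not flag:
--             return False
--         flag = False
--     return True
-- ===== SOURCE B (Python) =====
-- def _bisect_left(a, x):
--     lo, hi = 0, len(a)
--     while lo < hi:
--         mid = (lo + hi) // 2
--         if a[mid] < x:
--             lo = mid + 1
--         else:
--             hi = mid
--     return lo
--
--
-- def check(houses, heaters, r):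
--     if r < 0:
--         return False
--     hs = sorted(heaters)
--     for val in houses:
--         i = _bisect_left(hs, val)
--         near = (i < len(hs) and hs[i] - val <= r) or (i > 0 and val - hs[i - 1] <= r)
--         if not near:
--             return False
--     return True
-- ===== Notes on version B (the rewrite author's own statement) =====
-- stated objective: faster
-- what changed: B sorts the heaters once and binary-searches the nearest heater (the two neighbours of the insertion point) for each house, replacing A's linear scan of all heaters per house.
import Mathlib
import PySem

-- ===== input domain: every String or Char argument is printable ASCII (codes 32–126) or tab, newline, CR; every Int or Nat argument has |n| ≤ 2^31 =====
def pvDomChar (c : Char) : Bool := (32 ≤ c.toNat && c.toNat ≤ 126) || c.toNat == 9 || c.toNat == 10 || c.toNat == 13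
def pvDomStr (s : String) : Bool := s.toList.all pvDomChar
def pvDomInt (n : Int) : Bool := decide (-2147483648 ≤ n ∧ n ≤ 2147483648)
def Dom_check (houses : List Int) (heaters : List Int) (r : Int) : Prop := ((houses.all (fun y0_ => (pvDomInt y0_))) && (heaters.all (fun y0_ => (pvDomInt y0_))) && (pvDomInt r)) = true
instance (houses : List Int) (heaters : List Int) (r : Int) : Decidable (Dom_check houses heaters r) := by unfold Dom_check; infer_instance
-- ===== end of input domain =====

-- B replaces A's per-house linear scan of the heaters by one sort of heaters plus a
-- binary search per house (objective: faster, asymptotic).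

-- ===== PORT A =====
-- inner 'for h in heaters' loop with its break (flag = True)
def checkInner (heaters : List Int) (r : Int) (val : Int) : Bool :=
  match heaters with
  | [] => false
  | h :: t => if h - r ≤ val ∧ val ≤ h + r then true else checkInner t r val

-- outer 'for val in houses' loop: early 'return False' when the flag stayed False
def checkLoop (houses : List Int) (heaters : List Int) (r : Int) : Bool :=
  match houses with
  | [] => true
  | v :: t => if checkInner heaters r v then checkLoop t heaters r else false

def check (houses : List Int) (heaters : List Int) (r : Int) : Bool :=
  if r < 0 then false else checkLoop houses heaters r

-- ===== PORT B =====
-- Source B's hand-written _bisect_left is exactly Python's bisect_left; ported as the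
-- prelude's PySem.List.bisectLeft (same lo/hi binary-search loop).
def check_alt (houses : List Int) (heaters : List Int) (r : Int) : Bool :=
  if r < 0 then false else
    let hs := PySem.List.sorted heaters (fun x => x)
    houses.all (fun val =>
      let i := PySem.List.bisectLeft hs val
      (decide (i < hs.length) && decide (hs.getD i 0 - val ≤ r)) ||
      (decide (0 < i) && decide (val - hs.getD (i - 1) 0 ≤ r)))

-- ===== PRECONDITION & SPEC =====
def Spec_check (houses : List Int) (heaters : List Int) (r : Int) (out : Bool) : Prop := out = check_alt houses heaters r
instance (houses : List Int) (heaters : List Int) (r : Int) (out : Bool) : Decidable (Spec_check houses heaters r out) := by unfold Spec_check; infer_instance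

-- ===== CLAIM (what is proved, stated in full; the proofs are below) =====
def Claim_equal_check : Prop := ∀ (houses : List Int) (heaters : List Int) (r : Int), Dom_check houses heaters r → Spec_check houses heaters r (check houses heaters r)

-- ===== LEMMAS AND PROOFS =====

-- proof-only abbreviation for B's per-house test (definitionally the lambda in check_alt)
def covered (heaters : List Int) (r : Int) (val : Int) : Bool :=
  let hs := PySem.List.sorted heaters (fun x => x)
  let i := PySem.List.bisectLeft hs val
  (decide (i < hs.length) && decide (hs.getD i 0 - val ≤ r)) ||
  (decide (0 < i) && decide (val - hs.getD (i - 1) 0 ≤ r))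

-- A's inner loop is an existential scan
theorem checkInner_eq_any (heaters : List Int) (r val : Int) :
    checkInner heaters r val = heaters.any (fun h => decide (h - r ≤ val) && decide (val ≤ h + r)) := by
  induction heaters with
  | nil => rfl
  | cons h t ih =>
      simp only [checkInner, List.any_cons]
      split_ifs with hc
      · simp [hc.1, hc.2]
      · simp only [ih]
        rcases Decidable.not_and_iff_or_not.mp hc with h1 | h1 <;> simp [h1]

-- monotone access into a ≤-pairwise list
theorem getElem_mono_of_pairwise {l : List Int} (hp : List.Pairwise (· ≤ ·) l)
    {i j : Nat} (hij : i ≤ j) (hj : j < l.length) : l[i]'(lt_of_le_of_lt hij hj) ≤ l[j] := by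
  rcases Nat.lt_or_ge i j with h | h
  · exact List.pairwise_iff_getElem.mp hp i j (lt_of_le_of_lt hij hj) hj h
  · have : i = j := le_antisymm hij h
    subst this; exact le_refl _

-- the heart: on the sorted heater list, the two bisect neighbours decide coverage
theorem covered_eq_any (heaters : List Int) (r val : Int) (hr : 0 ≤ r) :
    covered heaters r val = heaters.any (fun h => decide (h - r ≤ val) && decide (val ≤ h + r)) := by
  rw [← (PySem.List.sorted_perm heaters (fun x => x) false).any_eq]
  set hs := PySem.List.sorted heaters (fun x => x) with hhs
  have hp : List.Pairwise (· ≤ ·) hs := PySem.List.sorted_pairwise heaters (fun x => x)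
  obtain ⟨hle, hlt, hge⟩ := PySem.List.bisectLeft_spec hs val hp
  unfold covered
  rw [← hhs]
  set i := PySem.List.bisectLeft hs val with hi
  rcases Bool.eq_false_or_eq_true (hs.any (fun h => decide (h - r ≤ val) && decide (val ≤ h + r))) with hany | hany
  · -- some heater h covers val: the corresponding bisect neighbour check fires
    rw [hany]
    have := List.any_eq_true.mp hany
    simp only [Bool.and_eq_true, decide_eq_true_eq] at this
    obtain ⟨h, hmem, h1, h2⟩ := this
    obtain ⟨j, hj, hjeq⟩ := List.mem_iff_getElem.mp hmem
    simp only [Bool.or_eq_true, Bool.and_eq_true, decide_eq_true_eq]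
    rcases le_or_gt val h with hvh | hvh
    · -- val ≤ h: h lies at an index ≥ i, so hs[i] exists and hs[i] ≤ h
      have hji : i ≤ j := by
        rcases le_or_gt i j with h' | h'
        · exact h'
        · exact absurd (hjeq ▸ hlt j hj h') (not_lt.mpr hvh)
      have hlen : i < hs.length := lt_of_le_of_lt hji hj
      left
      refine ⟨hlen, ?_⟩
      rw [List.getD_eq_getElem hs 0 hlen]
      have hmono := getElem_mono_of_pairwise hp hji hj
      rw [hjeq] at hmono
      linarith
    · -- h < val: h lies at an index < i, so hs[i-1] exists and h ≤ hs[i-1]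
      have hji : j < i := by
        rcases Nat.lt_or_ge j i with h' | h'
        · exact h'
        · exact absurd (hjeq ▸ hge j hj h') (not_le.mpr hvh)
      have hpos : 0 < i := by omega
      have hlen : i - 1 < hs.length := by omega
      right
      refine ⟨hpos, ?_⟩
      rw [List.getD_eq_getElem hs 0 hlen]
      have hmono := getElem_mono_of_pairwise hp (Nat.le_sub_one_of_lt hji) hlen
      rw [hjeq] at hmono
      linarith

  · -- no heater covers val: both neighbour checks must fail
    rw [hany]
    have hnone : ∀ h ∈ hs, ¬(h - r ≤ val ∧ val ≤ h + r) := by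
      intro h hm hc
      have : hs.any (fun h => decide (h - r ≤ val) && decide (val ≤ h + r)) = true :=
        List.any_eq_true.mpr ⟨h, hm, by simp [hc.1, hc.2]⟩
      rw [hany] at this
      exact Bool.false_ne_true this
    simp only [Bool.or_eq_false_iff, Bool.and_eq_false_iff, decide_eq_false_iff_not, not_lt, not_le]
    constructor
    · by_cases hlen : i < hs.length
      · right
        rw [List.getD_eq_getElem hs 0 hlen]
        have hv : val ≤ hs[i] := hge i hlen (le_refl i)
        have hn := hnone hs[i] (List.getElem_mem hlen)
        by_contra hcon
        have h2 := not_lt.mp hcon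
        exact hn ⟨by linarith, by linarith⟩
      · left; omega
    · by_cases hpos : 0 < i
      · right
        have hlen : i - 1 < hs.length := by omega
        rw [List.getD_eq_getElem hs 0 hlen]
        have hv : hs[i - 1] < val := hlt (i - 1) hlen (by omega)
        have hn := hnone hs[i - 1] (List.getElem_mem hlen)
        by_contra hcon
        have h2 := not_lt.mp hcon
        exact hn ⟨by linarith, by linarith⟩
      · left; omega
-- per-house equivalence, lifted over A's outer loop
theorem loop_eq (houses heaters : List Int) (r : Int) (hr : 0 ≤ r) :
    checkLoop houses heaters r = houses.all (fun val => covered heaters r val) := by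
  induction houses with
  | nil => rfl
  | cons v t ih =>
      have hcov : checkInner heaters r v = covered heaters r v := by
        rw [checkInner_eq_any, covered_eq_any heaters r v hr]
      simp only [checkLoop, List.all_cons, ih, hcov]
      cases covered heaters r v <;> simp

-- ===== VERDICT (by name: the statement is the Claim_ definition above) =====
theorem check_spec : Claim_equal_check := by
  intro houses heaters r _
  unfold Spec_check check check_alt
  split_ifs with h
  · rfl
  · exact loop_eq houses heaters r (not_lt.mp h)
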